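-- pv_equiv track=rewrite | github.com/computing-infra/pytorch-infra | .github/scripts/run_npu_test_shard.py | shard_tests
-- ===== SOURCE A (Python) =====
-- from typing import List, Set
--
-- def shard_tests(tests: List[str], shard: int, num_shards: int) -> List[str]:
--     """将测试文件均匀分片"""
--     if num_shards <= 1:
--         return tests
--
--     total = len(tests)
--     base_size = total // num_shards
--     remainder = total % num_shards
--
--     start = 0
--     for i in range(1, shard):
--         start += base_size + (1 if i <= remainder else 0)
--
--     current_size = base_size + (1 if shard <= remainder else 0)
--     return tests[start:start + current_size]
-- ===== SOURCE B (Python) =====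
-- def shard_tests(tests, shard, num_shards):
--     """将测试文件均匀分片"""
--     if num_shards <= 1:
--         return tests
--
--     total = len(tests)
--     base_size = total // num_shards
--     remainder = total % num_shards
--
--     def owner(i):
--         # shard (1-based) that owns the test at index i: the first `remainder`
--         # shards own base_size + 1 consecutive tests, the rest own base_size.
--         if i < remainder * (base_size + 1):
--             return i // (base_size + 1) + 1
--         return remainder + (i - remainder * (base_size + 1)) // base_size + 1
--
--     return [t for i, t in enumerate(tests) if owner(i) == shard]
-- ===== Notes on version B (the rewrite author's own statement) =====
-- stated objective: alternative
-- what changed: B drops A's offset-accumulation-plus-slice scheme entirely: it computes for each index its owning shard in closed form and selects the tests by filtering an enumeration, instead of summing per-shard sizes in a loop and slicing.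
-- outside the precondition, e.g. on shard_tests(['a', 'b'], 0, 2): A returns ['a', 'b'], B returns []
import Mathlib
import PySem

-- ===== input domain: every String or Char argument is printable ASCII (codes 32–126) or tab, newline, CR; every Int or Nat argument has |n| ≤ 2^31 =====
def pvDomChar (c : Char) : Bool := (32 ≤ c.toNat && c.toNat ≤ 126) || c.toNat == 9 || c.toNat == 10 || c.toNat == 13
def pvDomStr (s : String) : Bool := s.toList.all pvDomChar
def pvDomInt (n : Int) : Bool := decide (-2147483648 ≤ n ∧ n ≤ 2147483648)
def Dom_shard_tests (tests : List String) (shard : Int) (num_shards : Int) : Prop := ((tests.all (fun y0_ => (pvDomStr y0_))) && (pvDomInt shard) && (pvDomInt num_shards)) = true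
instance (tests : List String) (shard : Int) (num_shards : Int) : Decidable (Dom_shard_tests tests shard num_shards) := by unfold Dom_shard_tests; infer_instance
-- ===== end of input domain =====

-- B selects each test by computing the owning shard of its index in closed form and
-- filtering an enumeration, instead of accumulating a start offset and slicing (objective: alternative).

-- ===== PORT A =====
def shard_tests (tests : List String) (shard : Int) (num_shards : Int) : List String :=
  if num_shards ≤ 1 then tests
  else
    let total : Int := (tests.length : Int)
    let base_size := PySem.Int.floordiv total num_shards
    let remainder := PySem.Int.mod total num_shards
    let start := (PySem.List.pyRange 1 shard 1).foldl
      (fun s i => s + (base_size + (if i ≤ remainder then (1 : Int) else 0))) 0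
    let current_size := base_size + (if shard ≤ remainder then (1 : Int) else 0)
    PySem.List.slice tests (some start) (some (start + current_size))

-- ===== PORT B =====
-- shard (1-based) that owns the test at index i (Source B's local helper `owner`)
def pvOwner (base_size remainder : Int) (i : Int) : Int :=
  if i < remainder * (base_size + 1) then PySem.Int.floordiv i (base_size + 1) + 1
  else remainder + PySem.Int.floordiv (i - remainder * (base_size + 1)) base_size + 1

def shard_tests_alt (tests : List String) (shard : Int) (num_shards : Int) : List String :=
  if num_shards ≤ 1 then tests
  else
    let total : Int := (tests.length : Int)
    let base_size := PySem.Int.floordiv total num_shards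
    let remainder := PySem.Int.mod total num_shards
    ((PySem.List.enumerate tests 0).filter
      (fun p => pvOwner base_size remainder p.1 == shard)).map Prod.snd

-- ===== PRECONDITION & SPEC =====
-- Pre_ excludes only the inputs with a meaningless 1-based shard number shard ≤ 0 on which the
-- result actually depends on it (num_shards > 1 and tests nonempty): there A's loop accidentally
-- leaves start = 0 and always adds 1 to current_size, a corner value no caller would specify.
def Pre_shard_tests (tests : List String) (shard : Int) (num_shards : Int) : Prop :=
  1 ≤ shard ∨ num_shards ≤ 1 ∨ tests = []
instance (tests : List String) (shard : Int) (num_shards : Int) : Decidable (Pre_shard_tests tests shard num_shards) := by unfold Pre_shard_tests; infer_instance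
def pvWitness_shard_tests : List String × Int × Int := (["a", "b", "c"], 2, 2)

def Spec_shard_tests (tests : List String) (shard : Int) (num_shards : Int) (out : List String) : Prop := out = shard_tests_alt tests shard num_shards
instance (tests : List String) (shard : Int) (num_shards : Int) (out : List String) : Decidable (Spec_shard_tests tests shard num_shards out) := by unfold Spec_shard_tests; infer_instance

-- ===== CLAIM (what is proved, stated in full; the proofs are below) =====
def Claim_equal_shard_tests : Prop := ∀ (tests : List String) (shard : Int) (num_shards : Int), Dom_shard_tests tests shard num_shards → Pre_shard_tests tests shard num_shards → Spec_shard_tests tests shard num_shards (shard_tests tests shard num_shards)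

-- ===== LEMMAS AND PROOFS =====

-- A's loop, summed over range(1, shard) = 1..n, in closed form.
theorem pv_fold_closed (n : Nat) (base rem : Int) (hrem : 0 ≤ rem) :
    ((List.range n).map (fun k : Nat => (1 : Int) + (k : Int))).foldl
      (fun s i => s + (base + (if i ≤ rem then (1 : Int) else 0))) 0
    = (n : Int) * base + min (n : Int) rem := by
  induction n with
  | zero => simp; omega
  | succ n ih =>
    rw [List.range_succ, List.map_append, List.foldl_append, ih]
    simp only [List.map_cons, List.map_nil, List.foldl_cons, List.foldl_nil]
    have hb : ((n : Int) + 1) * base = (n : Int) * base + base := by ring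
    split_ifs with h <;> push_cast <;> push_cast at h <;> rw [hb] <;> omega

theorem pv_start_eq (shard base rem : Int) (hs : 1 ≤ shard) (hrem : 0 ≤ rem) :
    (PySem.List.pyRange 1 shard 1).foldl
      (fun s i => s + (base + (if i ≤ rem then (1 : Int) else 0))) 0
    = (shard - 1) * base + min (shard - 1) rem := by
  rw [PySem.List.pyRange_one, pv_fold_closed _ _ _ hrem]
  have h : ((shard - 1).toNat : Int) = shard - 1 := Int.toNat_of_nonneg (by omega)
  rw [h]

-- the owning-shard test of B is exactly membership in A's slice interval
theorem pv_owner_iff (base rem shard i : Int) (hb : 0 ≤ base)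
    (hiz : base = 0 → i < rem) :
    pvOwner base rem i = shard ↔
      (shard - 1) * base + min (shard - 1) rem ≤ i ∧
      i < (shard - 1) * base + min (shard - 1) rem + (base + (if shard ≤ rem then 1 else 0)) := by
  have hb1 : (0:Int) < base + 1 := by omega
  by_cases hlt : i < rem * (base + 1)
  · rw [pvOwner, if_pos hlt]
    constructor
    · intro h
      have hq : PySem.Int.floordiv i (base + 1) = shard - 1 := by omega
      rw [PySem.Int.floordiv_eq_iff_of_pos hb1] at hq
      obtain ⟨h1, h2⟩ := hq
      have hsr : shard ≤ rem := by
        by_contra hc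
        push_neg at hc
        have hm : rem * (base + 1) ≤ (shard - 1) * (base + 1) :=
          mul_le_mul_of_nonneg_right (by omega) (by omega)
        linarith
      rw [min_eq_left (by omega), if_pos hsr]
      have e1 : (shard - 1) * (base + 1) = (shard - 1) * base + (shard - 1) := by ring
      have e2 : (shard - 1 + 1) * (base + 1) = (shard - 1) * base + (shard - 1) + (base + 1) := by
        ring
      constructor <;> linarith
    · intro hB
      obtain ⟨h1, h2⟩ := hB
      have hsr : shard ≤ rem := by
        by_contra hc
        push_neg at hc
        simp only [min_eq_right (show rem ≤ shard - 1 by omega),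
          if_neg (show ¬ shard ≤ rem by omega)] at h1 h2
        have hm : rem * base ≤ (shard - 1) * base :=
          mul_le_mul_of_nonneg_right (by omega) hb
        have e : rem * (base + 1) = rem * base + rem := by ring
        linarith
      simp only [min_eq_left (show shard - 1 ≤ rem by omega), if_pos hsr] at h1 h2
      have hq : PySem.Int.floordiv i (base + 1) = shard - 1 := by
        rw [PySem.Int.floordiv_eq_iff_of_pos hb1]
        have e1 : (shard - 1) * (base + 1) = (shard - 1) * base + (shard - 1) := by ring
        have e2 : (shard - 1 + 1) * (base + 1) = (shard - 1) * base + (shard - 1) + (base + 1) := by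
          ring
        constructor <;> linarith
      omega
  · push_neg at hlt
    rcases eq_or_lt_of_le hb with hbz | hbpos
    · exfalso
      have hir := hiz hbz.symm
      have e : rem * (base + 1) = rem := by rw [← hbz]; ring
      linarith
    · rw [pvOwner, if_neg (by omega)]
      have e1 : (shard - 1 - rem) * base + rem * (base + 1) = (shard - 1) * base + rem := by ring
      have e2 : (shard - 1 - rem + 1) * base + rem * (base + 1)
          = (shard - 1) * base + rem + base := by ring
      constructor
      · intro h
        have hq : PySem.Int.floordiv (i - rem * (base + 1)) base = shard - 1 - rem := by omega
        have hd0 : 0 ≤ shard - 1 - rem := by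
          rw [← hq]
          exact (PySem.Int.le_floordiv_iff_mul_le hbpos).2 (by rw [zero_mul]; linarith)
        rw [PySem.Int.floordiv_eq_iff_of_pos hbpos] at hq
        obtain ⟨h1, h2⟩ := hq
        rw [min_eq_right (by omega), if_neg (by omega)]
        constructor <;> linarith
      · intro hB
        obtain ⟨h1, h2⟩ := hB
        have hsr : rem < shard := by
          by_contra hc
          push_neg at hc
          simp only [min_eq_left (show shard - 1 ≤ rem by omega), if_pos hc] at h2
          have hm : shard * (base + 1) ≤ rem * (base + 1) :=
            mul_le_mul_of_nonneg_right hc (by omega)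
          have e : shard * (base + 1) = (shard - 1) * base + (shard - 1) + (base + 1) := by ring
          linarith
        simp only [min_eq_right (show rem ≤ shard - 1 by omega),
          if_neg (show ¬ shard ≤ rem by omega)] at h1 h2
        have hq : PySem.Int.floordiv (i - rem * (base + 1)) base = shard - 1 - rem := by
          rw [PySem.Int.floordiv_eq_iff_of_pos hbpos]
          constructor <;> linarith
        omega

-- interval filter of an enumeration is a drop/take
theorem pv_filter_enum {α : Type} (xs : List α) (a b k : Int) :
    ((PySem.List.enumerate xs k).filter (fun q => decide (a ≤ q.1 ∧ q.1 < b))).map Prod.snd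
    = (xs.drop (a - k).toNat).take (b - max a k).toNat := by
  induction xs generalizing k with
  | nil => simp
  | cons x xs ih =>
    rw [PySem.List.enumerate_cons]
    by_cases ha : a ≤ k
    · by_cases hbk : k < b
      · have h1 : (a - k).toNat = 0 := by omega
        have h2 : (a - (k+1)).toNat = 0 := by omega
        have h3 : (b - max a k).toNat = (b - max a (k+1)).toNat + 1 := by omega
        simp only [List.filter_cons, ha, hbk, and_self, decide_true, if_true, List.map_cons,
          ih, h1, h2, h3, List.drop_zero, List.take_succ_cons]
      · have h3 : (b - max a k).toNat = 0 := by omega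
        have h4 : (b - max a (k+1)).toNat = 0 := by omega
        rw [List.filter_cons, if_neg (by simp; omega), ih, h3, h4]
        simp
    · have h1 : (a - k).toNat = (a - (k+1)).toNat + 1 := by omega
      have h2 : max a k = a := by omega
      have h3 : max a (k+1) = a := by omega
      rw [List.filter_cons, if_neg (by simp; omega), ih, h1, h2, h3, List.drop_succ_cons]

-- ===== VERDICT (by name: the statement is the Claim_ definition above) =====
theorem shard_tests_spec : Claim_equal_shard_tests := by
  intro tests shard num_shards _ hpre
  unfold Spec_shard_tests shard_tests shard_tests_alt
  by_cases h : num_shards ≤ 1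
  · simp [h]
  · simp only [h, if_false]
    rcases hpre with hs | h1 | ht
    · have hnpos : (0:Int) < num_shards := by omega
      set total : Int := (tests.length : Int) with htotal
      set base := PySem.Int.floordiv total num_shards with hbase
      set rem := PySem.Int.mod total num_shards with hrem
      have h0t : 0 ≤ total := by positivity
      have hr0 : 0 ≤ rem := PySem.Int.mod_nonneg _ (by omega)
      have hrlt : rem < num_shards := by
        rw [hrem, PySem.Int.mod_eq_emod_of_pos hnpos]
        exact Int.emod_lt_of_pos _ hnpos
      have hb0 : 0 ≤ base := by
        rw [hbase, PySem.Int.floordiv_eq_ediv_of_pos hnpos]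
        exact Int.ediv_nonneg h0t (le_of_lt hnpos)
      have htot : base * num_shards + rem = total := PySem.Int.floordiv_mul_add_mod total num_shards
      rw [pv_start_eq _ _ _ hs hr0]
      set start := (shard - 1) * base + min (shard - 1) rem with hstart
      set csize := base + (if shard ≤ rem then (1:Int) else 0) with hcsize
      have hst0 : 0 ≤ start := by
        have : 0 ≤ min (shard - 1) rem := by omega
        have : 0 ≤ (shard - 1) * base := mul_nonneg (by omega) hb0
        omega
      have hcs0 : 0 ≤ csize := by rw [hcsize]; split_ifs <;> omega
      -- rewrite B's filter predicate into the interval predicate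
      have hfil : ((PySem.List.enumerate tests 0).filter
            (fun p => pvOwner base rem p.1 == shard))
          = ((PySem.List.enumerate tests 0).filter
            (fun q => decide (start ≤ q.1 ∧ q.1 < start + csize))) := by
        apply List.filter_congr
        intro p hp
        rcases (PySem.List.mem_enumerate_iff _ _ _).1 hp with ⟨j, hj, rfl⟩
        simp only [zero_add]
        rw [Bool.eq_iff_iff]
        simp only [beq_iff_eq, decide_eq_true_eq]
        have hjt : (j : Int) < total := by rw [htotal]; exact_mod_cast hj
        refine pv_owner_iff base rem shard (j : Int) hb0 ?_
        intro hbz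
        have : total = rem := by rw [← htot, hbz]; ring
        omega
      rw [hfil, pv_filter_enum, PySem.List.slice_toNat _ hst0 (by omega)]
      have hmax : max start 0 = start := by omega
      simp only [hmax, sub_zero]
      congr 1
      omega
    · exact absurd h1 h
    · subst ht; simp [PySem.List.slice]
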